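-- pv_equiv track=rewrite | github.com/Max216/ThesisPKinDL | eval_twists.py | create_misclassification_dict
-- ===== SOURCE A (Python) =====
-- def create_misclassification_dict(labels):
-- 	md = dict()
-- 	for lbl_gold in labels:
-- 		md[lbl_gold] = dict()
-- 		for lbl_predicted_normal in labels:
-- 			md[lbl_gold][lbl_predicted_normal] = dict()
-- 			for lbl_predicted_twisted in labels:
-- 				md[lbl_gold][lbl_predicted_normal][lbl_predicted_twisted] = []
-- 	return md
-- ===== SOURCE B (Python) =====
-- def create_misclassification_dict(labels):
--     def build(level):
--         if level == 0:
--             return []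
--         return {lbl: build(level - 1) for lbl in labels}
--     return build(3)
-- ===== Notes on version B (the rewrite author's own statement) =====
-- stated objective: alternative
-- what changed: Replaces the three explicit nested loops that repeatedly re-enter and overwrite dict slots with a single recursion over a depth counter: build(level) returns a fresh empty list at level 0 and otherwise a dict comprehension mapping each label to build(level-1).
import Mathlib
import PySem

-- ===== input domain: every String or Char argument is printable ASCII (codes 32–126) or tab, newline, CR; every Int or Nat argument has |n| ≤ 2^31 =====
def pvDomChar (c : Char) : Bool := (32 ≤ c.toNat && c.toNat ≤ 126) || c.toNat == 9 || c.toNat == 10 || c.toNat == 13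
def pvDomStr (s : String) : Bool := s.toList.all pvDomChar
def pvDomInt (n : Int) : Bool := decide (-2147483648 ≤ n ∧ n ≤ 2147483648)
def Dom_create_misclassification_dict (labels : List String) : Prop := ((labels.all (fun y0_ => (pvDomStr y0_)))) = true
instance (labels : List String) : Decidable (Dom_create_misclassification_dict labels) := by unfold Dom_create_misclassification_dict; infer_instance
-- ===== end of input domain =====

-- B replaces A's three nested mutating loops by a recursion over a depth counter:
-- build(0) = fresh [], build(level) = {lbl: build(level-1) for lbl in labels}; same result.

-- ===== PORT A =====
-- Transliteration of A: each Python dict assignment md[...]... = v becomes a read (getD) of the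
-- current inner dict followed by an insert that writes the updated inner dict back.
def create_misclassification_dict (labels : List String) : List (String × List (String × List (String × List String))) :=
  let md : PySem.Dict String (PySem.Dict String (PySem.Dict String (List String))) :=
    labels.foldl (fun md lbl_gold =>
      labels.foldl (fun md lbl_predicted_normal =>
        labels.foldl (fun md lbl_predicted_twisted =>
          md.insert lbl_gold ((md.getD lbl_gold PySem.Dict.empty).insert lbl_predicted_normal
            (((md.getD lbl_gold PySem.Dict.empty).getD lbl_predicted_normal PySem.Dict.empty).insert
              lbl_predicted_twisted ([] : List String))))
          (md.insert lbl_gold ((md.getD lbl_gold PySem.Dict.empty).insert lbl_predicted_normal PySem.Dict.empty)))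
        (md.insert lbl_gold PySem.Dict.empty))
      PySem.Dict.empty
  md.items.map (fun g => (g.1, g.2.items.map (fun p => (p.1, p.2.items))))

-- ===== PORT B =====
-- Transliteration of B's recursion build(level). Python's build is depth-polymorphic (its return
-- type changes with level), which Lean's type convention cannot express in one recursive def, so
-- the recursion is unrolled by level: pvBuild0 is build's level==0 branch, pvBuildk labels is
-- build(k) (a dict comprehension mapping each label to the recursive call build(k-1)).
def pvBuild0 : List String := []
def pvBuild1 (labels : List String) : PySem.Dict String (List String) :=
  labels.foldl (fun d lbl => d.insert lbl pvBuild0) PySem.Dict.empty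
def pvBuild2 (labels : List String) : PySem.Dict String (PySem.Dict String (List String)) :=
  labels.foldl (fun d lbl => d.insert lbl (pvBuild1 labels)) PySem.Dict.empty
def pvBuild3 (labels : List String) : PySem.Dict String (PySem.Dict String (PySem.Dict String (List String))) :=
  labels.foldl (fun d lbl => d.insert lbl (pvBuild2 labels)) PySem.Dict.empty

def create_misclassification_dict_alt (labels : List String) : List (String × List (String × List (String × List String))) :=
  (pvBuild3 labels).items.map (fun g => (g.1, g.2.items.map (fun p => (p.1, p.2.items))))

-- ===== PRECONDITION & SPEC =====
def Spec_create_misclassification_dict (labels : List String) (out : List (String × List (String × List (String × List String)))) : Prop := out = create_misclassification_dict_alt labels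
instance (labels : List String) (out : List (String × List (String × List (String × List String)))) : Decidable (Spec_create_misclassification_dict labels out) := by unfold Spec_create_misclassification_dict; infer_instance

-- ===== CLAIM (what is proved, stated in full; the proofs are below) =====
def Claim_equal_create_misclassification_dict : Prop := ∀ (labels : List String), Dom_create_misclassification_dict labels → Spec_create_misclassification_dict labels (create_misclassification_dict labels)

-- ===== LEMMAS AND PROOFS =====

-- A loop that only ever touches key g of the outer dict is an update at key g.
theorem pv_loc {ν : Type} (l : List String) (md : PySem.Dict String ν) (g : String)
    (dflt : ν) (f : ν → String → ν) (d0 : ν) :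
    l.foldl (fun md x => md.insert g (f (md.getD g dflt) x)) (md.insert g d0)
      = md.insert g (l.foldl f d0) := by
  induction l generalizing d0 with
  | nil => rfl
  | cons x rest ih =>
    simp only [List.foldl_cons, PySem.Dict.insert_insert_self, PySem.Dict.getD_insert_self]
    exact ih (f d0 x)

-- Folding constant-value inserts over a dict whose items all carry that value grows the
-- key list exactly like PySem.Set.add (first occurrences, in order).
theorem pv_const {ν : Type} (l : List String) (s : List String) (v : ν) :
    (l.foldl (fun d k => d.insert k v) (PySem.Dict.mk (s.map (fun k => (k, v))))).items
      = (l.foldl PySem.Set.add s).map (fun k => (k, v)) := by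
  induction l generalizing s with
  | nil => simp
  | cons k rest ih =>
    by_cases h : s.contains k = true
    · have hc : (PySem.Dict.mk (s.map (fun k => (k, v)))).contains k = true := by
        simpa [PySem.Dict.contains_mk, List.any_map, Function.comp_def,
          ← List.contains_eq_any_beq] using h
      have h' : PySem.Set.contains s k = true := h
      have heq : (PySem.Dict.mk (s.map (fun k => (k, v)))).insert k v
          = PySem.Dict.mk (s.map (fun k => (k, v))) := by
        apply PySem.Dict.ext
        rw [PySem.Dict.items_insert_of_contains _ _ hc]
        refine (List.map_congr_left ?_).trans (List.map_id _)
        intro p hp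
        obtain ⟨x, hxs, rfl⟩ := List.mem_map.mp hp
        by_cases hxk : (x == k) = true
        · have hx : x = k := beq_iff_eq.mp hxk
          subst hx; simp
        · simp [hxk]
      simp only [List.foldl_cons, heq, PySem.Set.add]
      rw [if_pos h']
      exact ih s
    · rw [Bool.not_eq_true] at h
      have hk : k ∉ s := by simpa using h
      have hc : (PySem.Dict.mk (s.map (fun k => (k, v)))).contains k = false := by
        simp [PySem.Dict.contains_mk, List.any_map, Function.comp_def]
        intro x hx hxk
        exact hk (hxk ▸ hx)
      have h' : ¬ (PySem.Set.contains s k = true) := by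
        have hf : PySem.Set.contains s k = false := h
        simp only [hf]; exact Bool.false_ne_true
      have heq : (PySem.Dict.mk (s.map (fun k => (k, v)))).insert k v
          = PySem.Dict.mk ((s ++ [k]).map (fun k => (k, v))) := by
        apply PySem.Dict.ext
        rw [PySem.Dict.items_insert_of_not_contains _ _ hc]
        simp
      simp only [List.foldl_cons, heq, PySem.Set.add]
      rw [if_neg h']
      exact ih (s ++ [k])

theorem create_misclassification_dict_spec : Claim_equal_create_misclassification_dict := by
  intro labels _
  unfold Spec_create_misclassification_dict create_misclassification_dict create_misclassification_dict_alt
  -- collapse the inner loop of A: its body only touches md[g]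
  have h1 : ∀ (md : PySem.Dict String (PySem.Dict String (PySem.Dict String (List String))))
      (g p : String),
      labels.foldl (fun md t =>
          md.insert g ((md.getD g PySem.Dict.empty).insert p
            (((md.getD g PySem.Dict.empty).getD p PySem.Dict.empty).insert t ([] : List String))))
        (md.insert g ((md.getD g PySem.Dict.empty).insert p PySem.Dict.empty))
      = md.insert g ((md.getD g PySem.Dict.empty).insert p (pvBuild1 labels)) := by
    intro md g p
    rw [pv_loc labels md g PySem.Dict.empty
      (fun dg t => dg.insert p ((dg.getD p PySem.Dict.empty).insert t ([] : List String)))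
      ((md.getD g PySem.Dict.empty).insert p PySem.Dict.empty)]
    rw [pv_loc labels (md.getD g PySem.Dict.empty) p PySem.Dict.empty
      (fun dp t => dp.insert t ([] : List String)) PySem.Dict.empty]
    rfl
  -- collapse the middle loop of A
  have h2 : ∀ (md : PySem.Dict String (PySem.Dict String (PySem.Dict String (List String))))
      (g : String),
      labels.foldl (fun md p =>
          labels.foldl (fun md t =>
            md.insert g ((md.getD g PySem.Dict.empty).insert p
              (((md.getD g PySem.Dict.empty).getD p PySem.Dict.empty).insert t ([] : List String))))
          (md.insert g ((md.getD g PySem.Dict.empty).insert p PySem.Dict.empty)))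
        (md.insert g PySem.Dict.empty)
      = md.insert g (pvBuild2 labels) := by
    intro md g
    simp only [h1]
    rw [pv_loc labels md g PySem.Dict.empty
      (fun dg p => dg.insert p (pvBuild1 labels)) PySem.Dict.empty]
    rfl
  simp only [h2]
  -- both outermost structures are constant-value insert folds: compare their items
  have hA : (labels.foldl (fun md g => md.insert g (pvBuild2 labels)) PySem.Dict.empty).items
      = (PySem.List.dedup labels).map (fun g => (g, pvBuild2 labels)) :=
    pv_const labels [] (pvBuild2 labels)
  have hB : (pvBuild3 labels).items
      = (PySem.List.dedup labels).map (fun g => (g, pvBuild2 labels)) :=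
    pv_const labels [] (pvBuild2 labels)
  rw [hA, hB]

-- ===== VERDICT (by name: the statement is the Claim_ definition above) =====
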